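-- pv_equiv track=rewrite | github.com/Nimish5/Binary-Search | Shortest-String.py | solve
-- ===== SOURCE A (Python) =====
-- def solve(s):
--     stack = []
--     for num in s:
--         if not stack or stack[-1] == num:
--             stack.append(num)
--         else:  # stack[-1] != num:  eg: "10" or "01" in a string: "110001100"
--             stack.pop()
--     return len(stack)
-- ===== SOURCE B (Python) =====
-- def solve(s):
--     # Two-stage: run-length encode s into (char, length) runs, then reduce the
--     # runs with batch arithmetic (whole runs absorbed/cancelled at once).
--     runs = []
--     cur, k = None, 0
--     for ch in s:
--         if cur == ch:
--             k += 1
--         else: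
--             if cur is not None:
--                 runs.append((cur, k))
--             cur, k = ch, 1
--     if cur is not None:
--         runs.append((cur, k))
--     cand, cnt = None, 0
--     for c, k in runs:
--         if cnt == 0:
--             cand, cnt = c, k
--         elif cand == c:
--             cnt += k
--         elif k <= cnt:
--             cnt -= k
--         else:
--             cand, cnt = c, k - cnt
--     return cnt
-- ===== Notes on version B (the rewrite author's own statement) =====
-- stated objective: alternative
-- what changed: Replaces the per-character push/pop stack by a two-stage algorithm: run-length encode the string into (char,length) runs, then reduce the run list arithmetically, absorbing or cancelling a whole run per step (batch add/subtract with a <= comparison) instead of one character at a time.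
import Mathlib
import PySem

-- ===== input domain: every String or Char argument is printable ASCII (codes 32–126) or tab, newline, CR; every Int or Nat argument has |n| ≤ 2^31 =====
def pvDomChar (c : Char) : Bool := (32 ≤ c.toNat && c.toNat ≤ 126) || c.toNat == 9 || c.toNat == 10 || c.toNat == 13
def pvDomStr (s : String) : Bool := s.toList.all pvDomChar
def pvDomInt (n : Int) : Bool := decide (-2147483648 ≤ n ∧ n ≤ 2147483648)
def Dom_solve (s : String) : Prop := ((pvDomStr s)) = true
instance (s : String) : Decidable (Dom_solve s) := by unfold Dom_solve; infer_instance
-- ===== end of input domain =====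

-- B replaces the per-character stack by a two-stage algorithm: run-length encode, then
-- reduce whole runs arithmetically; alternative decomposition, same results.

-- ===== PORT A =====
-- one loop step of A: push when stack empty or same last char, else pop
def solveStep (stack : List Char) (num : Char) : List Char :=
  if stack = [] ∨ stack.getLast? = some num then stack ++ [num] else stack.dropLast

def solve (s : String) : Int :=
  ((s.toList.foldl solveStep []).length : Int)

-- ===== PORT B =====
-- stage 1 step: extend the current run or close it and start a new one
def rleStep (st : List (Char × Int) × Option Char × Int) (ch : Char) :
    List (Char × Int) × Option Char × Int :=
  if st.2.1 = some ch then (st.1, st.2.1, st.2.2 + 1)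
  else ((st.1 ++ (match st.2.1 with | some c => [(c, st.2.2)] | none => [])), some ch, 1)

-- close the last run (python's trailing "if cur is not None: runs.append(...)")
def rleFinish (st : List (Char × Int) × Option Char × Int) : List (Char × Int) :=
  st.1 ++ (match st.2.1 with | some c => [(c, st.2.2)] | none => [])

-- stage 2 step: absorb or cancel a whole run against the (cand, cnt) state
def batchStep (st : Option Char × Int) (r : Char × Int) : Option Char × Int :=
  if st.2 = 0 then (some r.1, r.2)
  else if st.1 = some r.1 then (st.1, st.2 + r.2)
  else if r.2 ≤ st.2 then (st.1, st.2 - r.2)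
  else (some r.1, r.2 - st.2)

def solve_alt (s : String) : Int :=
  ((rleFinish (s.toList.foldl rleStep ([], none, 0))).foldl batchStep (none, 0)).2

-- ===== PRECONDITION & SPEC =====
def Spec_solve (s : String) (out : Int) : Prop := out = solve_alt s
instance (s : String) (out : Int) : Decidable (Spec_solve s out) := by unfold Spec_solve; infer_instance

-- ===== CLAIM (what is proved, stated in full; the proofs are below) =====
def Claim_equal_solve : Prop := ∀ (s : String), Dom_solve s → Spec_solve s (solve s)

-- ===== LEMMAS AND PROOFS =====

-- proof-side intermediate: A's stack step seen as (candidate, count) voting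
def voteStep (st : Option Char × Int) (num : Char) : Option Char × Int :=
  if st.2 = 0 then (some num, 1)
  else if st.1 = some num then (st.1, st.2 + 1)
  else (st.1, st.2 - 1)

-- flatten a run list back to characters
def flatRuns (R : List (Char × Int)) : List Char :=
  R.flatMap (fun p => List.replicate p.2.toNat p.1)

-- A's stack fold agrees with the voting fold (A's stack is homogeneous).
lemma loop_inv (l : List Char) : ∀ (stack : List Char) (cand : Option Char) (count : Int),
    count = stack.length → (∀ x ∈ stack, cand = some x) →
    (l.foldl voteStep (cand, count)).2 = ((l.foldl solveStep stack).length : Int) ∧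
    ∀ x ∈ l.foldl solveStep stack, (l.foldl voteStep (cand, count)).1 = some x := by
  induction l with
  | nil => intro stack cand count h1 h2; exact ⟨h1, h2⟩
  | cons num l ih =>
    intro stack cand count h1 h2
    simp only [List.foldl_cons]
    by_cases hs : stack = []
    · subst hs
      have hc0 : count = 0 := by simpa using h1
      have hA : solveStep [] num = [num] := by simp [solveStep]
      have hB : voteStep (cand, count) num = (some num, 1) := by simp [voteStep, hc0]
      rw [hA, hB]
      refine ih [num] (some num) 1 (by simp) (by simp)
    · obtain ⟨x, hx⟩ : ∃ x, stack.getLast? = some x := by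
        cases h : stack.getLast? with
        | none => exact absurd (List.getLast?_eq_none_iff.mp h) hs
        | some y => exact ⟨y, rfl⟩
      have hxm : x ∈ stack := List.mem_of_getLast? hx
      have hc : cand = some x := h2 x hxm
      have hlen : 1 ≤ stack.length := List.length_pos_iff.mpr hs
      have hcne : count ≠ 0 := by
        rw [h1]; exact_mod_cast Nat.one_le_iff_ne_zero.mp hlen
      by_cases he : x = num
      · have hA : solveStep stack num = stack ++ [num] := by
          rw [he] at hx; simp [solveStep, hx]
        have hB : voteStep (cand, count) num = (cand, count + 1) := by
          simp [voteStep, hcne, hc, he]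
        rw [hA, hB]
        refine ih (stack ++ [num]) cand (count + 1) (by simp [h1]) ?_
        intro y hy
        rcases List.mem_append.mp hy with h | h
        · exact h2 y h
        · simp at h; subst h; rw [hc, he]
      · have hA : solveStep stack num = stack.dropLast := by
          have : stack.getLast? ≠ some num := by
            rw [hx]; intro h; exact he (Option.some.injEq _ _ ▸ h)
          simp [solveStep, hs, this]
        have hB : voteStep (cand, count) num = (cand, count - 1) := by
          have : cand ≠ some num := by rw [hc]; intro h; exact he (by injection h)
          simp [voteStep, hcne, this]
        rw [hA, hB]
        refine ih stack.dropLast cand (count - 1) ?_ ?_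
        · rw [List.length_dropLast, h1]; omega
        · intro y hy; exact h2 y (List.dropLast_subset stack hy)

-- RLE correctness: the runs produced by stage 1 flatten back to the input,
-- and every run length is ≥ 1.
lemma flat_append (R : List (Char × Int)) (c : Char) (k : Int) :
    flatRuns (R ++ [(c, k)]) = flatRuns R ++ List.replicate k.toNat c := by
  simp [flatRuns]

lemma rle_inv (l : List Char) : ∀ (runs : List (Char × Int)) (cur : Option Char) (k : Int),
    (∀ c, cur = some c → 1 ≤ k) → (∀ p ∈ runs, 1 ≤ p.2) →
    flatRuns (rleFinish (l.foldl rleStep (runs, cur, k))) =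
      flatRuns (rleFinish (runs, cur, k)) ++ l ∧
    ∀ p ∈ rleFinish (l.foldl rleStep (runs, cur, k)), 1 ≤ p.2 := by
  induction l with
  | nil =>
    intro runs cur k h1 h2
    cases cur with
    | none => exact ⟨by simp, by simpa [rleFinish] using h2⟩
    | some c0 =>
      refine ⟨by simp, ?_⟩
      intro p hp
      simp only [List.foldl_nil, rleFinish] at hp
      rcases List.mem_append.mp hp with h | h
      · exact h2 p h
      · simp at h; rw [h]; exact h1 c0 rfl
  | cons ch l ih =>
    intro runs cur k h1 h2
    simp only [List.foldl_cons]
    cases cur with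
    | none =>
      have hstep : rleStep (runs, none, k) ch = (runs, some ch, 1) := by
        simp [rleStep]
      rw [hstep]
      obtain ⟨hf, hp⟩ := ih runs (some ch) 1 (fun c _ => le_refl 1) h2
      refine ⟨?_, hp⟩
      rw [hf]
      simp [rleFinish, flatRuns]
    | some c0 =>
      have hk : 1 ≤ k := h1 c0 rfl
      by_cases he : c0 = ch
      · subst he
        have hstep : rleStep (runs, some c0, k) c0 = (runs, some c0, k + 1) := by
          simp [rleStep]
        rw [hstep]
        obtain ⟨hf, hp⟩ := ih runs (some c0) (k + 1) (fun c _ => by omega) h2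
        refine ⟨?_, hp⟩
        rw [hf]
        have hrep : List.replicate (k + 1).toNat c0 =
            List.replicate k.toNat c0 ++ [c0] := by
          have : (k + 1).toNat = k.toNat + 1 := by omega
          rw [this, List.replicate_succ']
        simp only [rleFinish, flat_append, hrep]
        simp
      · have hstep : rleStep (runs, some c0, k) ch = (runs ++ [(c0, k)], some ch, 1) := by
          simp [rleStep, he]
        rw [hstep]
        have h2' : ∀ p ∈ runs ++ [(c0, k)], 1 ≤ p.2 := by
          intro p hp
          rcases List.mem_append.mp hp with h | h
          · exact h2 p h
          · simp at h; rw [h]; exact hk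
        obtain ⟨hf, hp⟩ := ih (runs ++ [(c0, k)]) (some ch) 1 (fun c _ => le_refl 1) h2'
        refine ⟨?_, hp⟩
        rw [hf]
        simp only [rleFinish, flat_append]
        simp [flatRuns]

-- one vote followed by a batch of n is one batch of n+1
lemma batch_vote (c : Char) (cand : Option Char) (cnt n : Int) (hcnt : 0 ≤ cnt) (hn : 1 ≤ n) :
    batchStep (voteStep (cand, cnt) c) (c, n) = batchStep (cand, cnt) (c, n + 1) := by
  by_cases h0 : cnt = 0
  · subst h0
    simp [voteStep, batchStep]
    omega
  · by_cases hc : cand = some c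
    · have h1 : cnt + 1 ≠ 0 := by omega
      subst hc
      simp [voteStep, batchStep, h0, h1]
      omega
    · have hv : voteStep (cand, cnt) c = (cand, cnt - 1) := by simp [voteStep, h0, hc]
      rw [hv]
      by_cases h1 : cnt = 1
      · subst h1
        have h2 : ¬ (n + 1 ≤ (1 : Int)) := by omega
        simp [batchStep, hc, h2]
      · have h2 : cnt - 1 ≠ 0 := by omega
        by_cases h3 : n ≤ cnt - 1
        · have h4 : n + 1 ≤ cnt := by omega
          simp [batchStep, h2, hc, h3, h0, h4]
          omega
        · have h4 : ¬ (n + 1 ≤ cnt) := by omega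
          simp [batchStep, h2, hc, h3, h0, h4]
          omega

-- voting a whole run of kn equal characters is one batch step
lemma votes_replicate (kn : Nat) : ∀ (c : Char) (cand : Option Char) (cnt : Int),
    0 ≤ cnt → 1 ≤ kn →
    (List.replicate kn c).foldl voteStep (cand, cnt) = batchStep (cand, cnt) (c, (kn : Int)) := by
  induction kn with
  | zero => intro c cand cnt _ h; omega
  | succ n ih =>
    intro c cand cnt hcnt _
    by_cases hn : n = 0
    · subst hn
      simp only [List.replicate_succ, List.replicate_zero, List.foldl_cons, List.foldl_nil]
      by_cases h0 : cnt = 0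
      · simp [voteStep, batchStep, h0]
      · by_cases hc : cand = some c
        · simp [voteStep, batchStep, h0, hc]
        · have h1 : (1 : Int) ≤ cnt := by omega
          simp [voteStep, batchStep, h0, hc, h1]
    · have hn1 : 1 ≤ n := Nat.one_le_iff_ne_zero.mpr hn
      simp only [List.replicate_succ, List.foldl_cons]
      have hv : 0 ≤ (voteStep (cand, cnt) c).2 := by
        unfold voteStep; split_ifs with h1 h2 <;> simp <;> omega
      have hstep : (List.replicate n c).foldl voteStep (voteStep (cand, cnt) c) =
          batchStep (voteStep (cand, cnt) c) (c, (n : Int)) := by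
        have := ih c (voteStep (cand, cnt) c).1 (voteStep (cand, cnt) c).2 hv hn1
        simpa using this
      rw [hstep, batch_vote c cand cnt (n : Int) hcnt (by exact_mod_cast hn1)]
      push_cast
      ring_nf

-- folding voteStep over the flattened runs equals folding batchStep over the runs
lemma vote_flat (R : List (Char × Int)) : ∀ (st : Option Char × Int),
    0 ≤ st.2 → (∀ p ∈ R, 1 ≤ p.2) →
    (flatRuns R).foldl voteStep st = R.foldl batchStep st := by
  induction R with
  | nil => intro st _ _; simp [flatRuns]
  | cons p R ih =>
    intro st hst hR
    have hp1 : 1 ≤ p.2 := hR p (by simp)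
    have hflat : flatRuns (p :: R) = List.replicate p.2.toNat p.1 ++ flatRuns R := by
      simp [flatRuns]
    rw [hflat, List.foldl_append]
    have hkn : 1 ≤ p.2.toNat := by omega
    have hrep : (List.replicate p.2.toNat p.1).foldl voteStep st = batchStep st p := by
      have := votes_replicate p.2.toNat p.1 st.1 st.2 hst hkn
      have hcast : ((p.2.toNat : Int)) = p.2 := Int.toNat_of_nonneg (by omega)
      rw [hcast] at this
      simpa using this
    rw [hrep]
    have hb : 0 ≤ (batchStep st p).2 := by
      unfold batchStep; split_ifs with h1 h2 h3 <;> simp <;> omega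
    have := ih (batchStep st p) hb (fun q hq => hR q (by simp [hq]))
    simp only [List.foldl_cons]
    exact this

-- ===== VERDICT (by name: the statement is the Claim_ definition above) =====
theorem solve_spec : Claim_equal_solve := by
  intro s _
  unfold Spec_solve solve solve_alt
  have hA := (loop_inv s.toList [] none 0 (by simp) (by simp)).1
  obtain ⟨hf, hpos⟩ := rle_inv s.toList [] none 0 (by intro c h; cases h) (by intro p h; cases h)
  have hflat : flatRuns (rleFinish (s.toList.foldl rleStep ([], none, 0))) = s.toList := by
    rw [hf]; simp [flatRuns, rleFinish]
  have hB := vote_flat (rleFinish (s.toList.foldl rleStep ([], none, 0))) (none, 0) (by simp) hpos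
  rw [hflat] at hB
  rw [← hB, hA]
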